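-- pv_equiv track=rewrite | github.com/shivam1750/SMA_assignment | x.py | group_testcases
-- ===== SOURCE A (Python) =====
-- def group_testcases(test_cases):
--     sorted_testcases = sorted(test_cases.items(), key=lambda item: item[1], reverse=True)
--     group_size = len(sorted_testcases) // 5
--     groups = {}
--     for i in range(5):
--         start = i * group_size
--         end = (i + 1) * group_size if i < 4 else len(sorted_testcases)
--         groups[i + 1] = sorted_testcases[start:end]
--     return groups
-- ===== SOURCE B (Python) =====
-- def group_testcases(test_cases):
--     items = sorted(test_cases.items(), key=lambda item: item[1], reverse=True)
--     groups = {j: [] for j in range(1, 6)}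
--     group_size = len(items) // 5
--     if group_size == 0:
--         groups[5] = items
--     else:
--         for i, item in enumerate(items):
--             groups[min(i // group_size, 4) + 1].append(item)
--     return groups
-- ===== Notes on version B (the rewrite author's own statement) =====
-- stated objective: alternative
-- what changed: Instead of computing start/end slice boundaries for each of the 5 groups, B pre-creates the five empty groups and makes a single enumerate pass, routing each sorted item to group min(i // group_size, 4) + 1 (all items go to group 5 when group_size is 0, as in A).
import Mathlib
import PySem

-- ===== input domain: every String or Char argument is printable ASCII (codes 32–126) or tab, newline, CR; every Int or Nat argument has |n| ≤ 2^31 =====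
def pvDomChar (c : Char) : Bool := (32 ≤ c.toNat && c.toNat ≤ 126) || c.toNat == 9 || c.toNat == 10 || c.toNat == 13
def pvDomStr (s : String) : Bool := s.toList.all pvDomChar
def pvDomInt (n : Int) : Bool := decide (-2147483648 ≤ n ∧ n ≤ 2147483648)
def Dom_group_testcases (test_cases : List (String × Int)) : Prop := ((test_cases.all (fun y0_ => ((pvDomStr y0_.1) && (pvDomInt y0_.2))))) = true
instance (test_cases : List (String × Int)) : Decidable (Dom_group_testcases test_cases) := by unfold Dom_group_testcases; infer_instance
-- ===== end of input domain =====

-- B replaces A's five start/end slice computations with a single enumerate pass that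
-- routes each sorted item to group min(i // group_size, 4) + 1 (alternative decomposition, same cost).

-- ===== PORT A =====
def group_testcases (test_cases : List (String × Int)) : List (Int × List (String × Int)) :=
  let sorted_testcases := PySem.List.sorted test_cases (fun item => item.2) true
  let group_size : Int := PySem.Int.floordiv (sorted_testcases.length : Int) 5
  let groups : PySem.Dict Int (List (String × Int)) :=
    (PySem.List.pyRange 0 5 1).foldl (fun groups i =>
      let start := i * group_size
      let stop := if i < 4 then (i + 1) * group_size else (sorted_testcases.length : Int)
      groups.insert (i + 1) (PySem.List.slice sorted_testcases (some start) (some stop)))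
      PySem.Dict.empty
  groups.items

-- ===== PORT B =====
def group_testcases_alt (test_cases : List (String × Int)) : List (Int × List (String × Int)) :=
  let items := PySem.List.sorted test_cases (fun item => item.2) true
  let groups : PySem.Dict Int (List (String × Int)) :=
    (PySem.List.pyRange 1 6 1).foldl (fun d j => d.insert j []) PySem.Dict.empty
  let group_size : Int := PySem.Int.floordiv (items.length : Int) 5
  if group_size == 0 then
    (groups.insert 5 items).items
  else
    ((PySem.List.enumerate items 0).foldl
      (fun d p => d.modify (min (PySem.Int.floordiv p.1 group_size) 4 + 1) [] (fun l => l ++ [p.2]))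
      groups).items

-- ===== PRECONDITION & SPEC =====
def Spec_group_testcases (test_cases : List (String × Int)) (out : List (Int × List (String × Int))) : Prop := out = group_testcases_alt test_cases
instance (test_cases : List (String × Int)) (out : List (Int × List (String × Int))) : Decidable (Spec_group_testcases test_cases out) := by unfold Spec_group_testcases; infer_instance

-- ===== CLAIM (what is proved, stated in full; the proofs are below) =====
def Claim_equal_group_testcases : Prop := ∀ (test_cases : List (String × Int)), Dom_group_testcases test_cases → Spec_group_testcases test_cases (group_testcases test_cases)

-- ===== LEMMAS AND PROOFS =====

-- the common value of both ports, stated over the (descending-)sorted list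
def pvGSpec (s : List (String × Int)) : List (Int × List (String × Int)) :=
  let g := s.length / 5
  [(1, s.take g), (2, (s.drop g).take g), (3, (s.drop (2*g)).take g),
   (4, (s.drop (3*g)).take g), (5, s.drop (4*g))]

theorem pv_A_core (s : List (String × Int)) :
    (((PySem.List.pyRange 0 5 1).foldl (fun groups i =>
      groups.insert (i + 1) (PySem.List.slice s (some (i * PySem.Int.floordiv (s.length : Int) 5))
        (some (if i < 4 then (i + 1) * PySem.Int.floordiv (s.length : Int) 5 else (s.length : Int)))))
      PySem.Dict.empty).items) = pvGSpec s := by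
  have hr : PySem.List.pyRange 0 5 1 = [0,1,2,3,4] := by decide
  rw [hr]
  have hfresh := PySem.Dict.items_foldl_insert_fresh (l := [(0:Int),1,2,3,4]) (k := fun i => i + 1)
    (v := fun i => PySem.List.slice s (some (i * PySem.Int.floordiv (s.length : Int) 5))
        (some (if i < 4 then (i + 1) * PySem.Int.floordiv (s.length : Int) 5 else (s.length : Int))))
    (d := PySem.Dict.empty) (by intro a _; exact PySem.Dict.contains_empty _) (by decide)
  rw [hfresh]
  set n := s.length with hn
  set g := n / 5 with hg
  have hgs : PySem.Int.floordiv (n:Int) 5 = (g:Int) := by exact_mod_cast PySem.Int.floordiv_natCast n 5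
  have h5g : 5 * g ≤ n := by omega
  have cast2 : ((2*g:Nat):Int) = 2*(g:Int) := by push_cast; ring
  have cast3 : ((3*g:Nat):Int) = 3*(g:Int) := by push_cast; ring
  have cast4 : ((4*g:Nat):Int) = 4*(g:Int) := by push_cast; ring
  have e2 : PySem.List.slice s (some (g:Int)) (some ((2:Int)*(g:Int))) = List.take g (List.drop g s) := by
    have h := PySem.List.slice_natCast s g (2*g); rw [cast2] at h; rw [h]; congr 1; omega
  have e3 : PySem.List.slice s (some ((2:Int)*(g:Int))) (some ((3:Int)*(g:Int))) = List.take g (List.drop (2*g) s) := by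
    have h := PySem.List.slice_natCast s (2*g) (3*g); rw [cast2, cast3] at h; rw [h]; congr 1; omega
  have e4 : PySem.List.slice s (some ((3:Int)*(g:Int))) (some ((4:Int)*(g:Int))) = List.take g (List.drop (3*g) s) := by
    have h := PySem.List.slice_natCast s (3*g) (4*g); rw [cast3, cast4] at h; rw [h]; congr 1; omega
  have e5 : PySem.List.slice s (some ((4:Int)*(g:Int))) (some (n:Int)) = List.drop (4*g) s := by
    have h := PySem.List.slice_natCast s (4*g) n; rw [cast4] at h; rw [h]
    apply List.take_of_length_le; simp [← hn]
  have hemp : (PySem.Dict.empty : PySem.Dict Int (List (String × Int))).items = [] := rfl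
  simp only [List.map, hgs, pvGSpec, hemp]
  norm_num
  rw [e2, e3, e4, e5]
  simp only [← hn, ← hg]
  exact ⟨trivial, trivial, trivial, trivial, trivial⟩

theorem pv_update_of_subset (L S : List Int) (h : ∀ x ∈ L, x ∈ S) : PySem.Set.update S L = S := by
  induction L generalizing S with
  | nil => rw [PySem.Set.update_nil]
  | cons x L ih =>
    rw [PySem.Set.update_cons, PySem.Set.add_of_mem (h x (List.mem_cons_self))]
    exact ih S (fun y hy => h y (List.mem_cons_of_mem _ hy))

theorem pv_filt_all (g : Nat) (c : Int) (chunk : List (String × Int)) :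
    ∀ (σ : Int), (∀ k : Nat, k < chunk.length → min (PySem.Int.floordiv (σ + (k:Int)) (g:Int)) 4 + 1 = c) →
    ((PySem.List.enumerate chunk σ).filter
      (fun p => min (PySem.Int.floordiv p.1 (g:Int)) 4 + 1 == c)).map (fun p => p.2) = chunk := by
  induction chunk with
  | nil => intro σ _; simp [PySem.List.enumerate_nil]
  | cons x xs ih =>
    intro σ h
    rw [PySem.List.enumerate_cons]
    have h0 : min (PySem.Int.floordiv σ (g:Int)) 4 + 1 = c := by
      have := h 0 (by simp); simpa using this
    simp only [List.filter_cons]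
    simp only [h0, beq_self_eq_true, if_true]
    rw [List.map_cons]
    congr 1
    exact ih (σ + 1) (fun k hk => by
      have := h (k+1) (by simpa using Nat.succ_lt_succ hk)
      have e : σ + 1 + (k:Int) = σ + ((k+1 : Nat) : Int) := by push_cast; ring
      rw [e]; exact this)

theorem pv_filt_none (g : Nat) (c : Int) (chunk : List (String × Int)) :
    ∀ (σ : Int), (∀ k : Nat, k < chunk.length → min (PySem.Int.floordiv (σ + (k:Int)) (g:Int)) 4 + 1 ≠ c) →
    ((PySem.List.enumerate chunk σ).filter
      (fun p => min (PySem.Int.floordiv p.1 (g:Int)) 4 + 1 == c)).map (fun p => p.2) = [] := by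
  induction chunk with
  | nil => intro σ _; simp [PySem.List.enumerate_nil]
  | cons x xs ih =>
    intro σ h
    rw [PySem.List.enumerate_cons]
    have h0 : min (PySem.Int.floordiv σ (g:Int)) 4 + 1 ≠ c := by
      have := h 0 (by simp); simpa using this
    simp only [List.filter_cons]
    simp only [beq_iff_eq, h0, if_false]
    exact ih (σ + 1) (fun k hk => by
      have := h (k+1) (by simpa using Nat.succ_lt_succ hk)
      have e : σ + 1 + (k:Int) = σ + ((k+1 : Nat) : Int) := by push_cast; ring
      rw [e]; exact this)

theorem pv_key_lt (g j k : Nat) (hg : 0 < g) (hj : j ≤ 3) (hk : k < g) :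
    min (PySem.Int.floordiv (((j*g+k : Nat)) : Int) (g:Int)) 4 + 1 = (j:Int) + 1 := by
  rw [PySem.Int.floordiv_natCast]
  have hd : (j*g+k)/g = j := by
    have e : j*g+k = k + g*j := by ring
    rw [e, Nat.add_mul_div_left _ _ hg, Nat.div_eq_of_lt hk]; omega
  rw [hd]
  have : min ((j:Int)) 4 = (j:Int) := min_eq_left (by omega)
  omega

theorem pv_key_ge (g k : Nat) (hg : 0 < g) :
    min (PySem.Int.floordiv (((4*g+k : Nat)) : Int) (g:Int)) 4 + 1 = 5 := by
  rw [PySem.Int.floordiv_natCast]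
  have hd : (4*g+k)/g = k/g + 4 := by
    have e : 4*g+k = k + g*4 := by ring
    rw [e, Nat.add_mul_div_left _ _ hg]
  rw [hd]
  have : min (((k/g + 4 : Nat)) : Int) 4 = 4 := min_eq_right (by exact_mod_cast Nat.le_add_left 4 (k/g))
  omega

theorem pv_B_core (s : List (String × Int)) (hg0 : 0 < s.length / 5) :
    ((PySem.List.enumerate s 0).foldl
      (fun d p => d.modify (min (PySem.Int.floordiv p.1 ((s.length / 5 : Nat) : Int)) 4 + 1) [] (fun l => l ++ [p.2]))
      ((PySem.List.pyRange 1 6 1).foldl (fun d j => d.insert j []) PySem.Dict.empty)).items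
    = pvGSpec s := by
  have h5g : (s.length / 5) * 5 ≤ s.length := Nat.div_mul_le_self s.length 5
  set n := s.length with hn
  set g := n / 5 with hgdef
  set d0 := ((PySem.List.pyRange 1 6 1).foldl
      (fun d j => d.insert j ([] : List (String × Int))) PySem.Dict.empty) with hd0
  set D := ((PySem.List.enumerate s 0).foldl
      (fun d p => d.modify (min (PySem.Int.floordiv p.1 (g : Int)) 4 + 1) [] (fun l => l ++ [p.2]))
      d0) with hD
  -- keys of D
  have hd0keys : d0.keys = [1,2,3,4,5] := by decide
  have hDkeys : D.keys = [1,2,3,4,5] := by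
    rw [hD]
    rw [PySem.Dict.keys_foldl_modify_key (PySem.List.enumerate s 0)
      (fun p => min (PySem.Int.floordiv p.1 (g : Int)) 4 + 1) []
      (fun _ p => fun l => l ++ [p.2]) d0]
    rw [hd0keys]
    apply pv_update_of_subset
    intro x hx
    rcases List.mem_map.mp hx with ⟨p, hp, rfl⟩
    rcases (PySem.List.mem_enumerate_iff _ _ _).mp hp with ⟨k, hk, rfl⟩
    have e : (0 : Int) + (k : Int) = (((0*g+k : Nat)) : Int) := by push_cast; ring
    simp only [e]
    rw [PySem.Int.floordiv_natCast]
    have h1 : (0 : Int) ≤ ((((0*g+k : Nat))/g : Nat) : Int) := by positivity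
    simp only [List.mem_cons]
    omega
  have hDnodup : D.keys.Nodup := by rw [hDkeys]; decide
  -- values of D
  have hd0getD : ∀ c : Int, d0.getD c [] = [] := by
    intro c
    have hr : PySem.List.pyRange 1 6 1 = [1,2,3,4,5] := by decide
    rw [hd0, hr]
    simp only [List.foldl]
    simp only [PySem.Dict.getD_insert, PySem.Dict.getD_empty]
    split_ifs <;> rfl
  have hgetD : ∀ c : Int, D.getD c [] =
      ((PySem.List.enumerate s 0).filter
        (fun p => min (PySem.Int.floordiv p.1 (g : Int)) 4 + 1 == c)).map (fun p => p.2) := by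
    intro c
    have hfold : D = ((PySem.List.enumerate s 0).map
        (fun p => (min (PySem.Int.floordiv p.1 (g : Int)) 4 + 1, p.2))).foldl
        (fun d p => d.modify p.1 [] (fun l => l ++ [p.2])) d0 := by
      rw [List.foldl_map]
    rw [hfold, PySem.Dict.getD_foldl_modify_append, hd0getD]
    rw [List.filter_map, List.map_map]
    simp [Function.comp_def]
  -- chunk decomposition of s
  have hgpos : 0 < g := hg0
  have hlen : 5 * g ≤ n := by omega
  have hsplit : s = s.take g ++ ((s.drop g).take g ++ ((s.drop (2*g)).take g
      ++ ((s.drop (3*g)).take g ++ s.drop (4*g)))) := by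
    have d1 := (List.take_append_drop g s).symm
    have d2 : s.drop g = (s.drop g).take g ++ s.drop (2*g) := by
      have h := (List.take_append_drop g (s.drop g)).symm
      rwa [List.drop_drop, (show g + g = 2*g by ring)] at h
    have d3 : s.drop (2*g) = (s.drop (2*g)).take g ++ s.drop (3*g) := by
      have h := (List.take_append_drop g (s.drop (2*g))).symm
      rwa [List.drop_drop, (show 2*g + g = 3*g by ring)] at h
    have d4 : s.drop (3*g) = (s.drop (3*g)).take g ++ s.drop (4*g) := by
      have h := (List.take_append_drop g (s.drop (3*g))).symm
      rwa [List.drop_drop, (show 3*g + g = 4*g by ring)] at h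
    conv_lhs => rw [d1, d2, d3, d4]
  have lt1 : (s.take g).length = g := by rw [List.length_take]; omega
  have lt2 : ((s.drop g).take g).length = g := by rw [List.length_take, List.length_drop]; omega
  have lt3 : ((s.drop (2*g)).take g).length = g := by rw [List.length_take, List.length_drop]; omega
  have lt4 : ((s.drop (3*g)).take g).length = g := by rw [List.length_take, List.length_drop]; omega
  have henum : PySem.List.enumerate s 0 =
      PySem.List.enumerate (s.take g) 0
      ++ (PySem.List.enumerate ((s.drop g).take g) (((1*g : Nat)) : Int)
      ++ (PySem.List.enumerate ((s.drop (2*g)).take g) (((2*g : Nat)) : Int)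
      ++ (PySem.List.enumerate ((s.drop (3*g)).take g) (((3*g : Nat)) : Int)
      ++ PySem.List.enumerate (s.drop (4*g)) (((4*g : Nat)) : Int)))) := by
    conv_lhs => rw [hsplit]
    rw [PySem.List.enumerate_append, PySem.List.enumerate_append,
        PySem.List.enumerate_append, PySem.List.enumerate_append]
    rw [lt1, lt2, lt3, lt4]
    have c1 : (0 : Int) + (g : Int) = (((1*g : Nat)) : Int) := by push_cast; ring
    have c2 : (((1*g : Nat)) : Int) + (g : Int) = (((2*g : Nat)) : Int) := by push_cast; ring
    have c3 : (((2*g : Nat)) : Int) + (g : Int) = (((3*g : Nat)) : Int) := by push_cast; ring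
    have c4 : (((3*g : Nat)) : Int) + (g : Int) = (((4*g : Nat)) : Int) := by push_cast; ring
    rw [c1, c2, c3, c4]
  -- the five group contents
  have hv0 : ∀ k : Nat, k < (s.take g).length →
      min (PySem.Int.floordiv ((0 : Int) + (k:Int)) (g:Int)) 4 + 1 = 1 := by
    intro k hk; rw [lt1] at hk
    rw [(show (0 : Int) + (k:Int) = (((0*g+k : Nat)) : Int) by push_cast; ring)]
    have := pv_key_lt g 0 k hgpos (by norm_num) hk; omega
  have hv1 : ∀ k : Nat, k < ((s.drop g).take g).length →
      min (PySem.Int.floordiv ((((1*g : Nat)) : Int) + (k:Int)) (g:Int)) 4 + 1 = 2 := by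
    intro k hk; rw [lt2] at hk
    rw [(show (((1*g : Nat)) : Int) + (k:Int) = (((1*g+k : Nat)) : Int) by push_cast; ring)]
    have := pv_key_lt g 1 k hgpos (by norm_num) hk; omega
  have hv2 : ∀ k : Nat, k < ((s.drop (2*g)).take g).length →
      min (PySem.Int.floordiv ((((2*g : Nat)) : Int) + (k:Int)) (g:Int)) 4 + 1 = 3 := by
    intro k hk; rw [lt3] at hk
    rw [(show (((2*g : Nat)) : Int) + (k:Int) = (((2*g+k : Nat)) : Int) by push_cast; ring)]
    have := pv_key_lt g 2 k hgpos (by norm_num) hk; omega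
  have hv3 : ∀ k : Nat, k < ((s.drop (3*g)).take g).length →
      min (PySem.Int.floordiv ((((3*g : Nat)) : Int) + (k:Int)) (g:Int)) 4 + 1 = 4 := by
    intro k hk; rw [lt4] at hk
    rw [(show (((3*g : Nat)) : Int) + (k:Int) = (((3*g+k : Nat)) : Int) by push_cast; ring)]
    have := pv_key_lt g 3 k hgpos (by norm_num) hk; omega
  have hv4 : ∀ k : Nat, k < (s.drop (4*g)).length →
      min (PySem.Int.floordiv ((((4*g : Nat)) : Int) + (k:Int)) (g:Int)) 4 + 1 = 5 := by
    intro k _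
    rw [(show (((4*g : Nat)) : Int) + (k:Int) = (((4*g+k : Nat)) : Int) by push_cast; ring)]
    have := pv_key_ge g k hgpos; omega
  have G1 : ((PySem.List.enumerate s 0).filter
      (fun p => min (PySem.Int.floordiv p.1 (g : Int)) 4 + 1 == (1 : Int))).map (fun p => p.2)
      = (s.take g) := by
    rw [henum]
    simp only [List.filter_append, List.map_append]
    rw [
      pv_filt_all g 1 (s.take g) (0 : Int)
        (by intro k hk; have := hv0 k hk; omega),
      pv_filt_none g 1 ((s.drop g).take g) (((1*g : Nat)) : Int)
        (by intro k hk; have := hv1 k hk; omega),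
      pv_filt_none g 1 ((s.drop (2*g)).take g) (((2*g : Nat)) : Int)
        (by intro k hk; have := hv2 k hk; omega),
      pv_filt_none g 1 ((s.drop (3*g)).take g) (((3*g : Nat)) : Int)
        (by intro k hk; have := hv3 k hk; omega),
      pv_filt_none g 1 (s.drop (4*g)) (((4*g : Nat)) : Int)
        (by intro k hk; have := hv4 k hk; omega)]
    simp
  have G2 : ((PySem.List.enumerate s 0).filter
      (fun p => min (PySem.Int.floordiv p.1 (g : Int)) 4 + 1 == (2 : Int))).map (fun p => p.2)
      = ((s.drop g).take g) := by
    rw [henum]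
    simp only [List.filter_append, List.map_append]
    rw [
      pv_filt_none g 2 (s.take g) (0 : Int)
        (by intro k hk; have := hv0 k hk; omega),
      pv_filt_all g 2 ((s.drop g).take g) (((1*g : Nat)) : Int)
        (by intro k hk; have := hv1 k hk; omega),
      pv_filt_none g 2 ((s.drop (2*g)).take g) (((2*g : Nat)) : Int)
        (by intro k hk; have := hv2 k hk; omega),
      pv_filt_none g 2 ((s.drop (3*g)).take g) (((3*g : Nat)) : Int)
        (by intro k hk; have := hv3 k hk; omega),
      pv_filt_none g 2 (s.drop (4*g)) (((4*g : Nat)) : Int)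
        (by intro k hk; have := hv4 k hk; omega)]
    simp
  have G3 : ((PySem.List.enumerate s 0).filter
      (fun p => min (PySem.Int.floordiv p.1 (g : Int)) 4 + 1 == (3 : Int))).map (fun p => p.2)
      = ((s.drop (2*g)).take g) := by
    rw [henum]
    simp only [List.filter_append, List.map_append]
    rw [
      pv_filt_none g 3 (s.take g) (0 : Int)
        (by intro k hk; have := hv0 k hk; omega),
      pv_filt_none g 3 ((s.drop g).take g) (((1*g : Nat)) : Int)
        (by intro k hk; have := hv1 k hk; omega),
      pv_filt_all g 3 ((s.drop (2*g)).take g) (((2*g : Nat)) : Int)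
        (by intro k hk; have := hv2 k hk; omega),
      pv_filt_none g 3 ((s.drop (3*g)).take g) (((3*g : Nat)) : Int)
        (by intro k hk; have := hv3 k hk; omega),
      pv_filt_none g 3 (s.drop (4*g)) (((4*g : Nat)) : Int)
        (by intro k hk; have := hv4 k hk; omega)]
    simp
  have G4 : ((PySem.List.enumerate s 0).filter
      (fun p => min (PySem.Int.floordiv p.1 (g : Int)) 4 + 1 == (4 : Int))).map (fun p => p.2)
      = ((s.drop (3*g)).take g) := by
    rw [henum]
    simp only [List.filter_append, List.map_append]
    rw [
      pv_filt_none g 4 (s.take g) (0 : Int)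
        (by intro k hk; have := hv0 k hk; omega),
      pv_filt_none g 4 ((s.drop g).take g) (((1*g : Nat)) : Int)
        (by intro k hk; have := hv1 k hk; omega),
      pv_filt_none g 4 ((s.drop (2*g)).take g) (((2*g : Nat)) : Int)
        (by intro k hk; have := hv2 k hk; omega),
      pv_filt_all g 4 ((s.drop (3*g)).take g) (((3*g : Nat)) : Int)
        (by intro k hk; have := hv3 k hk; omega),
      pv_filt_none g 4 (s.drop (4*g)) (((4*g : Nat)) : Int)
        (by intro k hk; have := hv4 k hk; omega)]
    simp
  have G5 : ((PySem.List.enumerate s 0).filter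
      (fun p => min (PySem.Int.floordiv p.1 (g : Int)) 4 + 1 == (5 : Int))).map (fun p => p.2)
      = (s.drop (4*g)) := by
    rw [henum]
    simp only [List.filter_append, List.map_append]
    rw [
      pv_filt_none g 5 (s.take g) (0 : Int)
        (by intro k hk; have := hv0 k hk; omega),
      pv_filt_none g 5 ((s.drop g).take g) (((1*g : Nat)) : Int)
        (by intro k hk; have := hv1 k hk; omega),
      pv_filt_none g 5 ((s.drop (2*g)).take g) (((2*g : Nat)) : Int)
        (by intro k hk; have := hv2 k hk; omega),
      pv_filt_none g 5 ((s.drop (3*g)).take g) (((3*g : Nat)) : Int)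
        (by intro k hk; have := hv3 k hk; omega),
      pv_filt_all g 5 (s.drop (4*g)) (((4*g : Nat)) : Int)
        (by intro k hk; have := hv4 k hk; omega)]
    simp
  -- assemble
  have hitems := PySem.Dict.items_eq_map_keys D hDnodup []
  rw [hDkeys] at hitems
  rw [hitems]
  simp only [List.map]
  rw [hgetD 1, hgetD 2, hgetD 3, hgetD 4, hgetD 5]
  rw [G1, G2, G3, G4, G5]
  simp only [pvGSpec, ← hn, ← hgdef]

theorem pv_A_eval (tc : List (String × Int)) :
    group_testcases tc = pvGSpec (PySem.List.sorted tc (fun item => item.2) true) := by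
  exact pv_A_core (PySem.List.sorted tc (fun item => item.2) true)

theorem pv_B_eval (tc : List (String × Int)) :
    group_testcases_alt tc = pvGSpec (PySem.List.sorted tc (fun item => item.2) true) := by
  simp only [group_testcases_alt]
  set s := PySem.List.sorted tc (fun item => item.2) true with hs
  have hgs : PySem.Int.floordiv (s.length : Int) 5 = ((s.length / 5 : Nat) : Int) := by
    exact_mod_cast PySem.Int.floordiv_natCast s.length 5
  rw [hgs]
  by_cases hz : s.length / 5 = 0
  · have hcond : ((((s.length / 5 : Nat)) : Int) == 0) = true := by simp [hz]
    rw [hcond, if_pos rfl]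
    have hc : (((PySem.List.pyRange 1 6 1).foldl (fun d j => d.insert j ([] : List (String × Int))) PySem.Dict.empty)).contains 5 = true := by decide
    rw [PySem.Dict.items_insert_of_contains _ _ hc]
    have hit : (((PySem.List.pyRange 1 6 1).foldl (fun d j => d.insert j ([] : List (String × Int))) PySem.Dict.empty)).items
        = [(1,[]),(2,[]),(3,[]),(4,[]),(5,[])] := by decide
    rw [hit]
    simp only [pvGSpec, hz]
    norm_num
  · have hcond : ((((s.length / 5 : Nat)) : Int) == 0) = false := by
      rw [beq_eq_false_iff_ne]; exact_mod_cast hz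
    rw [hcond, if_neg (by simp)]
    exact pv_B_core s (Nat.pos_of_ne_zero hz)

-- ===== VERDICT (by name: the statement is the Claim_ definition above) =====
theorem group_testcases_spec : Claim_equal_group_testcases := by
  intro tc _
  unfold Spec_group_testcases
  rw [pv_A_eval, pv_B_eval]
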